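-- pv_equiv track=rewrite | github.com/Junroot/Algorithm | programmers/17683.py | convert_sheet
-- ===== SOURCE A (Python) =====
-- sheet_map = {
--     'C': '0',
--     'C#': '1',
--     'D': '2',
--     'D#': '3',
--     'E': '4',
--     'E#': 'c',
--     'F': '5',
--     'F#': '6',
--     'G': '7',
--     'G#': '8',
--     'A': '9',
--     'A#': 'a',
--     'B': 'b'
-- }
--
-- def convert_sheet(sheet):
--     index = 0
--     result = ''
--     while index < len(sheet):
--         note = sheet[index]
--         index += 1
--         if index < len(sheet) and sheet[index] == '#':
--             note += '#'
--             index += 1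
--         result += sheet_map[note]
--     return result
-- ===== SOURCE B (Python) =====
-- sheet_map = {
--     'C': '0',
--     'C#': '1',
--     'D': '2',
--     'D#': '3',
--     'E': '4',
--     'E#': 'c',
--     'F': '5',
--     'F#': '6',
--     'G': '7',
--     'G#': '8',
--     'A': '9',
--     'A#': 'a',
--     'B': 'b'
-- }
--
-- def convert_sheet(sheet):
--     # Tokenize first (a '#' attaches to the single-char token just before it),
--     # then map every token through sheet_map and join.
--     tokens = []
--     for ch in sheet:
--         if ch == '#' and tokens and len(tokens[-1]) == 1:
--             tokens[-1] += '#'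
--         else:
--             tokens.append(ch)
--     return ''.join(sheet_map[t] for t in tokens)
-- ===== Notes on version B (the rewrite author's own statement) =====
-- stated objective: alternative
-- what changed: A fuses tokenization and mapping in one index-driven while loop with a one-character lookahead; B first builds the full token list in a single for-each pass that attaches a sharp sign to the preceding singleton token (lookbehind, no index arithmetic), then maps each token through sheet_map and joins. Pre_ excludes only the sheets containing an invalid note token, on which both A and B raise the same KeyError.
import Mathlib
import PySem

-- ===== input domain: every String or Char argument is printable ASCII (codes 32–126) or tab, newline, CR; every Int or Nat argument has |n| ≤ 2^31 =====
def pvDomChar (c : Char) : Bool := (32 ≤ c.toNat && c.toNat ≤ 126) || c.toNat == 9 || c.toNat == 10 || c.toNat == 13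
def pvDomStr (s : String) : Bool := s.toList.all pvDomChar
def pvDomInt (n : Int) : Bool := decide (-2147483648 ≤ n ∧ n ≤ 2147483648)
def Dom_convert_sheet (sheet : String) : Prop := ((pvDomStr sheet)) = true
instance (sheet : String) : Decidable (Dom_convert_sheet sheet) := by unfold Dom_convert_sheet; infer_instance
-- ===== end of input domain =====

-- B replaces A's index-driven lookahead while loop by a tokenize-then-map decomposition
-- (one for-each pass attaching '#' to the preceding singleton token, then a mapped join);
-- same cost, alternative structure. Proved equal on all inputs where A returns (Pre_).

-- ===== PORT A =====
-- sheet_map, with str keys/values represented as their character lists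
def sheetMap : PySem.Dict (List Char) (List Char) :=
  PySem.Dict.ofList [(['C'],['0']), (['C','#'],['1']), (['D'],['2']), (['D','#'],['3']),
    (['E'],['4']), (['E','#'],['c']), (['F'],['5']), (['F','#'],['6']), (['G'],['7']),
    (['G','#'],['8']), (['A'],['9']), (['A','#'],['a']), (['B'],['b'])]

-- A's while loop: note = sheet[index]; if the next char is '#', consume it too;
-- result += sheet_map[note].  none models the KeyError.
def goA : List Char → List Char → Option (List Char)
  | [], acc => some acc
  | [c], acc =>
    match sheetMap.get? [c] with
    | some v => some (acc ++ v)
    | none => none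
  | c :: '#' :: cs, acc =>
    match sheetMap.get? [c, '#'] with
    | some v => goA cs (acc ++ v)
    | none => none
  | c :: c2 :: cs, acc =>
    match sheetMap.get? [c] with
    | some v => goA (c2 :: cs) (acc ++ v)
    | none => none

def convert_sheet (sheet : String) : String :=
  String.mk ((goA sheet.toList []).getD [])

-- ===== PORT B =====
-- one step of B's tokenizing for-loop: '#' joins the preceding singleton token
def stepB (tokens : List (List Char)) (ch : Char) : List (List Char) :=
  if ch = '#' ∧ tokens ≠ [] ∧ (tokens.getLastD []).length = 1 then
    tokens.dropLast ++ [tokens.getLastD [] ++ ['#']]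
  else
    tokens ++ [[ch]]

def convert_sheet_alt (sheet : String) : String :=
  let tokens := sheet.toList.foldl stepB []
  match tokens.mapM (fun t => sheetMap.get? t) with
  | some vs => String.mk vs.flatten
  | none => ""

-- ===== PRECONDITION & SPEC =====
-- Pre_ is exactly the sheets on which the Python A returns (elsewhere it raises KeyError,
-- and B raises the same KeyError): every char is a note letter or '#', the sheet does not
-- start with '#', and a '#' follows only a letter other than 'B' or '#'.
def Pre_convert_sheet (sheet : String) : Prop :=
  (sheet.toList.all (fun c => ['A', 'B', 'C', 'D', 'E', 'F', 'G', '#'].contains c)) = true ∧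
  sheet.toList.head? ≠ some '#' ∧
  ((sheet.toList.zip sheet.toList.tail).all
    (fun p => !(p.2 == '#') || (!(p.1 == '#') && !(p.1 == 'B')))) = true
instance (sheet : String) : Decidable (Pre_convert_sheet sheet) := by
  unfold Pre_convert_sheet; infer_instance

def pvWitness_convert_sheet : String := "C#D"

def Spec_convert_sheet (sheet : String) (out : String) : Prop := out = convert_sheet_alt sheet
instance (sheet : String) (out : String) : Decidable (Spec_convert_sheet sheet out) := by unfold Spec_convert_sheet; infer_instance

-- ===== CLAIM (what is proved, stated in full; the proofs are below) =====
def Claim_equal_convert_sheet : Prop := ∀ (sheet : String), Dom_convert_sheet sheet → Pre_convert_sheet sheet → Spec_convert_sheet sheet (convert_sheet sheet)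

-- ===== LEMMAS AND PROOFS =====

-- greedy tokenization as A's loop performs it
def toks : List Char → List (List Char)
  | [] => []
  | [c] => [[c]]
  | c :: '#' :: cs => [c, '#'] :: toks cs
  | c :: c2 :: cs => [c] :: toks (c2 :: cs)

theorem goA_eq_toks (cs : List Char) : ∀ acc,
    goA cs acc =
      match toks cs |>.mapM (fun t => sheetMap.get? t) with
      | some vs => some (acc ++ vs.flatten)
      | none => none := by
  induction cs using toks.induct with
  | case1 => intro acc; simp [goA, toks]
  | case2 c => intro acc; simp only [goA, toks, List.mapM_cons, List.mapM_nil]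
               cases sheetMap.get? [c] <;> simp
  | case3 c cs ih =>
      intro acc
      simp only [goA, toks, List.mapM_cons]
      cases h : sheetMap.get? [c, '#'] with
      | none => simp
      | some v =>
          cases hm : List.mapM (fun t => sheetMap.get? t) (toks cs) with
          | none => simp [ih, hm]
          | some vs => simp [ih, hm]
  | case4 c c2 cs hne ih =>
      intro acc
      rw [show goA (c :: c2 :: cs) acc =
            match sheetMap.get? [c] with
            | some v => goA (c2 :: cs) (acc ++ v)
            | none => none from by
          cases hc : c2 <;> simp_all [goA]]
      rw [show toks (c :: c2 :: cs) = [c] :: toks (c2 :: cs) from by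
          cases hc : c2 <;> simp_all [toks]]
      simp only [List.mapM_cons]
      cases h : sheetMap.get? [c] with
      | none => simp
      | some v =>
          cases hm : List.mapM (fun t => sheetMap.get? t) (toks (c2 :: cs)) with
          | none => simp [ih, hm]
          | some vs => simp [ih, hm]

theorem toks_ne_nil (cs : List Char) (h : cs ≠ []) : toks cs ≠ [] := by
  cases cs with
  | nil => exact absurd rfl h
  | cons c cs => cases cs with
    | nil => simp [toks]
    | cons c2 cs' => by_cases hc : c2 = '#' <;> simp_all [toks]

theorem stepB_cons (t : List Char) (T : List (List Char)) (c : Char) (h : T ≠ []) :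
    stepB (t :: T) c = t :: stepB T c := by
  obtain ⟨u, T', rfl⟩ := List.exists_cons_of_ne_nil h
  simp only [stepB, List.getLastD_cons, List.dropLast_cons₂, ne_eq, reduceCtorEq,
    not_false_iff, true_and]
  split_ifs <;> simp

theorem toks_snoc (xs : List Char) (c : Char) : toks (xs ++ [c]) = stepB (toks xs) c := by
  induction xs using toks.induct with
  | case1 => by_cases hc : c = '#' <;> simp [toks, stepB, hc]
  | case2 a =>
      by_cases hc : c = '#' <;> simp_all [toks, stepB]
  | case3 a cs ih =>
      rw [show (a :: '#' :: cs) ++ [c] = a :: '#' :: (cs ++ [c]) from by simp,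
          show toks (a :: '#' :: (cs ++ [c])) = [a, '#'] :: toks (cs ++ [c]) from rfl,
          show toks (a :: '#' :: cs) = [a, '#'] :: toks cs from rfl, ih]
      cases hT : toks cs with
      | nil =>
          have hcs : cs = [] := by by_contra hne; exact toks_ne_nil cs hne hT
          subst hcs
          by_cases hc : c = '#' <;> simp [toks, stepB, hc]
      | cons t T => rw [← hT, stepB_cons _ _ _ (by rw [hT]; simp)]
  | case4 a c2 cs hne ih =>
      rw [List.cons_append] at ih
      rw [List.cons_append, List.cons_append,
          show toks (a :: c2 :: (cs ++ [c])) = [a] :: toks (c2 :: (cs ++ [c])) from by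
            cases hc : c2 <;> simp_all [toks],
          show toks (a :: c2 :: cs) = [a] :: toks (c2 :: cs) from by
            cases hc : c2 <;> simp_all [toks],
          ih, stepB_cons _ _ _ (toks_ne_nil _ (by simp))]

theorem foldl_stepB (cs : List Char) : ∀ xs, cs.foldl stepB (toks xs) = toks (xs ++ cs) := by
  induction cs with
  | nil => intro xs; simp
  | cons c cs ih =>
      intro xs
      rw [List.foldl_cons, ← toks_snoc, ih (xs ++ [c])]
      simp

theorem convert_eq (sheet : String) : convert_sheet sheet = convert_sheet_alt sheet := by
  unfold convert_sheet convert_sheet_alt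
  rw [show sheet.toList.foldl stepB [] = toks sheet.toList from by
      rw [show ([] : List (List Char)) = toks [] from rfl, foldl_stepB]; simp]
  rw [goA_eq_toks]
  cases hm : List.mapM (fun t => sheetMap.get? t) (toks sheet.toList) with
  | none => simp only [hm]; rfl
  | some vs => simp [hm]

-- ===== VERDICT (by name: the statement is the Claim_ definition above) =====
theorem convert_sheet_spec : Claim_equal_convert_sheet := by
  intro sheet _ _
  unfold Spec_convert_sheet
  exact convert_eq sheet
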